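-- pv_equiv track=rewrite | github.com/raleighlittles/CodingBat-Python-Exercise-Solutions | Warmup-2/string_match.py | string_match
-- ===== SOURCE A (Python) =====
-- def string_match(a, b):
--
--   a_len, b_len = len(a), len(b)
--   # Trivial case
--   if ((a_len < 2) or (b_len < 2)):
--     return 0
--
--   num_matches = 0
--   # Need to leave room at the end for searching ahead
--   for i in range(0, a_len):
--     if (a_len >= (i + 2)) and (b_len >= (i + 2)) and (a[i:i+2] == b[i:i+2]):
--       num_matches += 1
--
--
--   return num_matches
-- ===== SOURCE B (Python) =====
-- def string_match(a, b):
--     # per-index equality list, then count adjacent pairs of matches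
--     eq = [x == y for x, y in zip(a, b)]
--     return sum(1 for i in range(len(eq) - 1) if eq[i] and eq[i + 1])
-- ===== Notes on version B (the rewrite author's own statement) =====
-- stated objective: simpler
-- what changed: A compares a freshly-built 2-character slice of each string at every position; B first builds a per-index boolean equality list over the zipped strings and then counts adjacent pairs of Trues, replacing slice comparisons (and A's explicit short-string guard) with a single adjacency scan.
import Mathlib
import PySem

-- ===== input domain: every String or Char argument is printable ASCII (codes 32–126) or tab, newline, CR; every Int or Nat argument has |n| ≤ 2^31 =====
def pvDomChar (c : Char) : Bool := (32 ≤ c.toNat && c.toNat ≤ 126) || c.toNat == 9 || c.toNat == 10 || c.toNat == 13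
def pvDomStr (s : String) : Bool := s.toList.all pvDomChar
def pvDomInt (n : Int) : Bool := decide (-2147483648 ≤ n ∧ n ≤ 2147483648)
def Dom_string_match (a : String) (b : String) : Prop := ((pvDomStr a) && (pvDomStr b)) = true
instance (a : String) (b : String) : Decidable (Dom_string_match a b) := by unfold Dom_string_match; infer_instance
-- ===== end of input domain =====

-- B reframes A's slice comparisons as a per-index equality list plus an adjacent-pair scan (simpler decomposition, same cost).


-- ===== PORT A =====
-- literal transliteration of A; strings are handled as their character lists
-- (Python string length/slicing = list-of-chars length/slicing, exact on the ASCII domain)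
def string_match (a : String) (b : String) : Int :=
  let al := a.toList
  let bl := b.toList
  let a_len := PySem.List.len al
  let b_len := PySem.List.len bl
  if a_len < 2 ∨ b_len < 2 then 0
  else
    (PySem.List.pyRange 0 a_len).foldl
      (fun num_matches i =>
        if a_len ≥ i + 2 ∧ b_len ≥ i + 2 ∧
           PySem.List.slice al (some i) (some (i + 2)) = PySem.List.slice bl (some i) (some (i + 2))
        then num_matches + 1 else num_matches) 0

-- ===== PORT B =====
-- literal transliteration of Source B; eq[i] / eq[i+1] are ported with pyGetD: every index
-- range(len(eq)-1) produces is in range, so the default is never consulted — exact.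
def string_match_alt (a : String) (b : String) : Int :=
  let eq := List.zipWith (fun x y => x == y) a.toList b.toList
  (PySem.List.pyRange 0 (PySem.List.len eq - 1)).foldl
    (fun acc i =>
      if PySem.List.pyGetD eq i false && PySem.List.pyGetD eq (i + 1) false
      then acc + 1 else acc) 0

-- ===== PRECONDITION & SPEC =====
def Spec_string_match (a : String) (b : String) (out : Int) : Prop := out = string_match_alt a b
instance (a : String) (b : String) (out : Int) : Decidable (Spec_string_match a b out) := by unfold Spec_string_match; infer_instance

-- ===== CLAIM (what is proved, stated in full; the proofs are below) =====
def Claim_equal_string_match : Prop := ∀ (a : String) (b : String), Dom_string_match a b → Spec_string_match a b (string_match a b)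

-- ===== LEMMAS AND PROOFS =====

theorem main_lists (la lb : List Char) :
    (if PySem.List.len la < 2 ∨ PySem.List.len lb < 2 then (0 : Int)
     else
       (PySem.List.pyRange 0 (PySem.List.len la)).foldl
         (fun num_matches i =>
           if PySem.List.len la ≥ i + 2 ∧ PySem.List.len lb ≥ i + 2 ∧
              PySem.List.slice la (some i) (some (i + 2)) = PySem.List.slice lb (some i) (some (i + 2))
           then num_matches + 1 else num_matches) 0)
    = (PySem.List.pyRange 0 (PySem.List.len (List.zipWith (fun x y => x == y) la lb) - 1)).foldl
        (fun acc i =>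
          if PySem.List.pyGetD (List.zipWith (fun x y => x == y) la lb) i false &&
             PySem.List.pyGetD (List.zipWith (fun x y => x == y) la lb) (i + 1) false
          then acc + 1 else acc) 0 := by
  have hlen : (List.zipWith (fun x y : Char => x == y) la lb).length = min la.length lb.length :=
    List.length_zipWith
  rcases Nat.eq_zero_or_pos (min la.length lb.length) with hk | hk
  · -- min length 0: both sides are 0
    have h0 : PySem.List.len (List.zipWith (fun x y : Char => x == y) la lb) - 1 = (-1 : Int) := by
      rw [PySem.List.len_eq, hlen, hk]; norm_num
    have hr : PySem.List.pyRange 0 (-1) = [] := by decide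
    rw [h0, hr]
    simp only [List.foldl_nil]
    rw [if_pos]
    rw [PySem.List.len_eq, PySem.List.len_eq]
    omega
  · obtain ⟨j, hj⟩ : ∃ j, min la.length lb.length = j + 1 := ⟨_, (Nat.succ_pred_eq_of_pos hk).symm⟩
    have h1 : PySem.List.len (List.zipWith (fun x y : Char => x == y) la lb) - 1 = ((j : Int)) := by
      rw [PySem.List.len_eq, hlen, hj]; push_cast; ring
    rw [h1, PySem.List.pyRange_zero_natCast, PySem.List.foldl_count_if, List.countP_map]
    by_cases hshort : PySem.List.len la < 2 ∨ PySem.List.len lb < 2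
    · -- short strings: j = 0
      have hj0 : j = 0 := by
        rw [PySem.List.len_eq, PySem.List.len_eq] at hshort
        omega
      rw [if_pos hshort, hj0]
      simp
    · rw [if_neg hshort]
      rw [PySem.List.len_eq] at hshort ⊢
      rw [PySem.List.len_eq]
      have hfun : (fun (num_matches i : Int) =>
          if ((la.length : Int) ≥ i + 2 ∧ (lb.length : Int) ≥ i + 2 ∧
              PySem.List.slice la (some i) (some (i + 2)) = PySem.List.slice lb (some i) (some (i + 2)))
          then num_matches + 1 else num_matches)
        = (fun num_matches i =>
          if (fun i => decide ((la.length : Int) ≥ i + 2 ∧ (lb.length : Int) ≥ i + 2 ∧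
              PySem.List.slice la (some i) (some (i + 2)) = PySem.List.slice lb (some i) (some (i + 2)))) i = true
          then num_matches + 1 else num_matches) := by
        funext nm i; simp only [decide_eq_true_eq]
      rw [PySem.List.pyRange_zero_natCast, hfun, PySem.List.foldl_count_if, List.countP_map]
      simp only [zero_add, Nat.cast_inj]
      -- split range la.length at j; the tail contributes nothing
      have hm : la.length = j + (la.length - j) := by omega
      rw [hm, List.range_add, List.countP_append, ← hm]
      have htail : List.countP
          ((fun i => decide ((la.length : Int) ≥ i + 2 ∧ (lb.length : Int) ≥ i + 2 ∧
              PySem.List.slice la (some i) (some (i + 2)) = PySem.List.slice lb (some i) (some (i + 2)))) ∘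
            (fun k : Nat => (k : Int)))
          (List.map (fun x => j + x) (List.range (la.length - j))) = 0 := by
        rw [List.countP_eq_zero]
        intro x hx
        simp only [List.mem_map] at hx
        obtain ⟨t, _, rfl⟩ := hx
        simp only [Function.comp_apply, decide_eq_true_eq, not_and]
        intro h1 h2
        exfalso
        have : ((j + t : Nat) : Int) + 2 ≤ (la.length : Int) := h1
        have : ((j + t : Nat) : Int) + 2 ≤ (lb.length : Int) := h2
        omega
      rw [htail, Nat.add_zero]
      apply List.countP_congr
      intro i hi
      simp only [List.mem_range] at hi
      have hia : i + 1 < la.length := by omega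
      have hib : i + 1 < lb.length := by omega
      simp only [Function.comp_apply]
      have h2 : ((i : Nat) : Int) + 2 = ((i + 2 : Nat) : Int) := by push_cast; ring
      have hi1 : ((i : Nat) : Int) + 1 = ((i + 1 : Nat) : Int) := by push_cast; ring
      rw [h2, hi1, PySem.List.slice_natCast, PySem.List.slice_natCast,
          PySem.List.pyGetD_natCast, PySem.List.pyGetD_natCast]
      have hd : i + 2 - i = 2 := by omega
      rw [hd]
      have hta : List.take 2 (List.drop i la) = [la[i], la[i + 1]] := by
        rw [List.drop_eq_getElem_cons (show i < la.length by omega),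
            List.drop_eq_getElem_cons (show i + 1 < la.length from hia)]
        rfl
      have htb : List.take 2 (List.drop i lb) = [lb[i], lb[i + 1]] := by
        rw [List.drop_eq_getElem_cons (show i < lb.length by omega),
            List.drop_eq_getElem_cons (show i + 1 < lb.length from hib)]
        rfl
      rw [hta, htb]
      have hga : i < (List.zipWith (fun x y : Char => x == y) la lb).length := by omega
      have hgb : i + 1 < (List.zipWith (fun x y : Char => x == y) la lb).length := by omega
      rw [List.getD_eq_getElem _ _ hga, List.getD_eq_getElem _ _ hgb,
          List.getElem_zipWith, List.getElem_zipWith]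
      simp [List.cons.injEq]
      constructor
      · rintro ⟨-, -, h⟩; exact h
      · intro h; exact ⟨by omega, by omega, h⟩


theorem string_match_spec : Claim_equal_string_match := by
  intro a b _
  unfold Spec_string_match string_match string_match_alt
  exact main_lists a.toList b.toList
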